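-- pv_equiv track=rewrite | github.com/hossainmd-uc/technical-prep | Unit3Session2.py | merge_schedules
-- ===== SOURCE A (Python) =====
-- def merge_schedules(schedule1, schedule2):
--     a = len(schedule1)
--     b = len(schedule2)
--
--     res = []
--     m = min(a, b)
--
--     for i in range(m):
--         res.append(schedule1[i])
--         res.append(schedule2[i])
--
--     if a > b:
--         res.extend(schedule1[m:a])
--     elif b > a:
--         res.extend(schedule2[m:b])
--
--     return "".join(res)
-- ===== SOURCE B (Python) =====
-- _SENTINEL = object()
--
-- def merge_schedules(schedule1, schedule2):
--     it1, it2 = iter(schedule1), iter(schedule2)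
--     parts = []
--     while True:
--         x = next(it1, _SENTINEL)
--         y = next(it2, _SENTINEL)
--         if x is _SENTINEL and y is _SENTINEL:
--             break
--         if x is not _SENTINEL:
--             parts.append(x)
--         if y is not _SENTINEL:
--             parts.append(y)
--     return "".join(parts)
-- ===== Notes on version B (the rewrite author's own statement) =====
-- stated objective: idiomatic
-- what changed: Replaces A's index-counting min-loop plus separate if/elif tail-extend with a single sentinel-guarded pass over both iterators that interleaves and absorbs the leftover tail in one loop.
import Mathlib
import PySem

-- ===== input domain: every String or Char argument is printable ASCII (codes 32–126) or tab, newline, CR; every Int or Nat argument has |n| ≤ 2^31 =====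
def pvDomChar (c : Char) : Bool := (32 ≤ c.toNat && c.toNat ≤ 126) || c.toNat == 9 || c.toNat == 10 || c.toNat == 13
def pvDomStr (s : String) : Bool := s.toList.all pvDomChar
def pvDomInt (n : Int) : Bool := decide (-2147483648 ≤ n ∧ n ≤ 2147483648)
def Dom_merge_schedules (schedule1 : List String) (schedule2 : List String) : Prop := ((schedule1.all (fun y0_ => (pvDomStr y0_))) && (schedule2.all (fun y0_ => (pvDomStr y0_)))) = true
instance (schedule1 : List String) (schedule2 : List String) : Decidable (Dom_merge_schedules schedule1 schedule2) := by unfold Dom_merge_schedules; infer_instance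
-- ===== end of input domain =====

-- B replaces A's index-counting min-loop plus separate tail-extend by one sentinel-guarded
-- pass over both sequences (objective: idiomatic single traversal; same asymptotic cost).

-- ===== PORT A =====
-- index i is always in range inside the loop, so schedule[i] is ported as pyGetD with a dummy default
def merge_schedules (schedule1 : List String) (schedule2 : List String) : String :=
  let a : Int := schedule1.length
  let b : Int := schedule2.length
  let m : Int := min a b
  let res : List String :=
    (PySem.List.pyRange 0 m 1).foldl
      (fun r i => r ++ [PySem.List.pyGetD schedule1 i "", PySem.List.pyGetD schedule2 i ""]) []
  let res : List String :=
    if a > b then res ++ PySem.List.slice schedule1 (some m) (some a)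
    else if b > a then res ++ PySem.List.slice schedule2 (some m) (some b)
    else res
  PySem.Str.join "" res

-- ===== PORT B =====
-- the while loop of Source B: each round takes the next element of each iterator if present
def mergeLoop : List String → List String → List String
  | [], [] => []
  | [], y :: ys => y :: mergeLoop [] ys
  | x :: xs, [] => x :: mergeLoop xs []
  | x :: xs, y :: ys => x :: y :: mergeLoop xs ys

def merge_schedules_alt (schedule1 : List String) (schedule2 : List String) : String :=
  PySem.Str.join "" (mergeLoop schedule1 schedule2)

-- ===== PRECONDITION & SPEC =====
def Spec_merge_schedules (schedule1 : List String) (schedule2 : List String) (out : String) : Prop := out = merge_schedules_alt schedule1 schedule2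
instance (schedule1 : List String) (schedule2 : List String) (out : String) : Decidable (Spec_merge_schedules schedule1 schedule2 out) := by unfold Spec_merge_schedules; infer_instance

-- ===== CLAIM (what is proved, stated in full; the proofs are below) =====
def Claim_equal_merge_schedules : Prop := ∀ (schedule1 : List String) (schedule2 : List String), Dom_merge_schedules schedule1 schedule2 → Spec_merge_schedules schedule1 schedule2 (merge_schedules schedule1 schedule2)

-- ===== LEMMAS AND PROOFS =====

-- B's loop is the interleaving of the common prefix followed by the leftover tail
lemma mergeLoop_nil_left (ys : List String) : mergeLoop [] ys = ys := by
  induction ys with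
  | nil => simp [mergeLoop]
  | cons y ys ih => simp [mergeLoop, ih]

lemma mergeLoop_nil_right (xs : List String) : mergeLoop xs [] = xs := by
  induction xs with
  | nil => simp [mergeLoop]
  | cons x xs ih => simp [mergeLoop, ih]

lemma mergeLoop_eq (s1 s2 : List String) :
    mergeLoop s1 s2 =
      (s1.zip s2).flatMap (fun p => [p.1, p.2]) ++ s1.drop s2.length ++ s2.drop s1.length := by
  induction s1 generalizing s2 with
  | nil => cases s2 <;> simp [mergeLoop_nil_left]
  | cons x xs ih =>
    cases s2 with
    | nil => simp [mergeLoop_nil_right]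
    | cons y ys => simp [mergeLoop, ih ys]

-- A's for-loop builds the flattened zip of the common prefix
lemma foldl_range_zip (n : ℕ) (s1 s2 : List String) (h1 : n ≤ s1.length) (h2 : n ≤ s2.length) :
    (List.range n).foldl (fun r i => r ++ [s1.getD i "", s2.getD i ""]) [] =
      ((s1.take n).zip (s2.take n)).flatMap (fun p => [p.1, p.2]) := by
  induction n with
  | zero => simp
  | succ k ih =>
    rw [List.range_succ, List.foldl_append, ih (by omega) (by omega)]
    have e1 : s1.take (k+1) = s1.take k ++ [s1.getD k ""] := by
      rw [List.take_add_one]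
      congr 1
      rw [List.getElem?_eq_getElem (by omega)]
      simp [List.getD, List.getElem?_eq_getElem (show k < s1.length by omega)]
    have e2 : s2.take (k+1) = s2.take k ++ [s2.getD k ""] := by
      rw [List.take_add_one]
      congr 1
      rw [List.getElem?_eq_getElem (by omega)]
      simp [List.getD, List.getElem?_eq_getElem (show k < s2.length by omega)]
    rw [e1, e2, List.zip_append (by simp; omega)]
    simp

lemma zip_take_min (s1 s2 : List String) :
    (s1.take (min s1.length s2.length)).zip (s2.take (min s1.length s2.length)) = s1.zip s2 := by
  induction s1 generalizing s2 with
  | nil => simp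
  | cons x xs ih =>
    cases s2 with
    | nil => simp
    | cons y ys => simp [Nat.succ_min_succ, ih ys]

lemma merge_lists_eq (s1 s2 : List String) :
    merge_schedules s1 s2 = merge_schedules_alt s1 s2 := by
  unfold merge_schedules merge_schedules_alt
  rw [mergeLoop_eq]
  have hm : min ((s1.length : Int)) ((s2.length : Int)) = ((min s1.length s2.length : ℕ) : Int) := by
    omega
  simp only [hm, PySem.List.pyRange_one, Int.sub_zero, Int.toNat_natCast, List.foldl_map,
             zero_add, PySem.List.pyGetD_natCast]
  rw [foldl_range_zip (min s1.length s2.length) s1 s2 (Nat.min_le_left _ _) (Nat.min_le_right _ _),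
      zip_take_min]
  split_ifs with h1 h2
  · -- a > b : tail from s1
    have hmin : min s1.length s2.length = s2.length := by omega
    have hsl : PySem.List.slice s1 (some ((min s1.length s2.length : ℕ) : Int)) (some ((s1.length : ℕ) : Int)) = s1.drop s2.length := by
      rw [PySem.List.slice_natCast, hmin, List.take_of_length_le (by simp)]
    rw [hsl, List.drop_of_length_le (show s2.length ≤ s1.length by omega)]
    simp
  · -- b > a : tail from s2
    have hmin : min s1.length s2.length = s1.length := by omega
    have hsl : PySem.List.slice s2 (some ((min s1.length s2.length : ℕ) : Int)) (some ((s2.length : ℕ) : Int)) = s2.drop s1.length := by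
      rw [PySem.List.slice_natCast, hmin, List.take_of_length_le (by simp)]
    rw [hsl, List.drop_of_length_le (show s1.length ≤ s2.length by omega)]
    simp
  · -- equal lengths : no tail
    rw [List.drop_of_length_le (by omega), List.drop_of_length_le (by omega)]
    simp

-- ===== VERDICT (by name: the statement is the Claim_ definition above) =====
theorem merge_schedules_spec : Claim_equal_merge_schedules := by
  intro s1 s2 _
  unfold Spec_merge_schedules
  exact merge_lists_eq s1 s2
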